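-- pv_equiv track=rewrite | github.com/superleo/tair-kvcache | kv_cache_manager/optimizer/tools/trace_converter/utils/prefix_hash.py | tokens_to_block_ids
-- ===== SOURCE A (Python) =====
-- from typing import List
--
-- def hash_int64_func(prev_hash: int, current_value: int) -> int:
--     """
--     精确实现C++的HashIntFunc (Jenkins Hash变种)
--
--     C++ 原始实现 (hash_util.h):
--         hash ^= hasher(value) + 0x9e3779b97f4a7c15 + (hash << 12) + (hash >> 32);
--
--     Jenkins Hash 核心:
--     - 异或混合 std::hash<int64_t>(value)
--     - 加上黄金比例常数 0x9e3779b97f4a7c15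
--     - 位移混淆: (hash << 12) + (hash >> 32)
--
--     Args:
--         prev_hash: 前一个哈希值
--         current_value: 当前值 (int64)
--
--     Returns:
--         新的哈希值 (int64)
--     """
--     # std::hash<int64_t>(value) 在多数平台直接返回值本身
--     value_hash = current_value
--
--     # Jenkins Hash: hash ^= hasher(value) + 0x9e3779b97f4a7c15 + (hash << 12) + (hash >> 32)
--     # Python整数无限精度,C++的int64_t会自然截断,我们需要手动模拟
--     GOLDEN_RATIO = 0x9e3779b97f4a7c15
--
--     # 将输入转为无符号64位进行位运算 (模拟C++的二补数表示)
--     hash_unsigned = prev_hash & 0xFFFFFFFFFFFFFFFF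
--     value_unsigned = value_hash & 0xFFFFFFFFFFFFFFFF
--
--     # 计算各部分 (全部在无符号64位范围内)
--     left_shift = (hash_unsigned << 12) & 0xFFFFFFFFFFFFFFFF
--     right_shift = hash_unsigned >> 32
--     rhs = (value_unsigned + GOLDEN_RATIO + left_shift + right_shift) & 0xFFFFFFFFFFFFFFFF
--
--     # 异或操作
--     result = hash_unsigned ^ rhs
--
--     # 截断到64位 (模拟C++ int64_t的自然溢出)
--     result &= 0xFFFFFFFFFFFFFFFF
--
--     # 转换回Python的有符号表示 (模拟int64_t的二补数)
--     if result >= 0x8000000000000000: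
--         result -= 0x10000000000000000
--
--     return result
--
-- def tokens_to_block_ids(
--     token_ids: List[int],
--     block_size: int = 16,
--     truncate: bool = False
-- ) -> List[int]:
--     """
--     将token IDs转换为带前缀依赖的block IDs
--
--     直接使用哈希值作为block ID,确保完全无状态:
--     - 相同输入保证相同输出 (幂等性)
--     - 天然支持多进程并行 (无共享状态)
--     - 与C++ ApplyPrefixHash行为一致
--
--     Args:
--         token_ids: token ID列表
--         block_size: block大小
--         truncate: 是否截断不完整的block
--
--     Returns:
--         block ID列表 (哈希值)
--     """
--     block_ids = []
--     prev_hash = 0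
--
--     for i in range(0, len(token_ids), block_size):
--         if truncate and i + block_size > len(token_ids):
--             continue
--
--         # 获取当前block的tokens
--         block_tokens = token_ids[i: i + block_size]
--
--         # 计算block的哈希 (包含前缀依赖)
--         block_hash = prev_hash
--         for token in block_tokens:
--             block_hash = hash_int64_func(block_hash, token)
--
--         # 直接使用哈希值作为block ID
--         block_ids.append(block_hash)
--         prev_hash = block_hash
--
--     return block_ids
-- ===== SOURCE B (Python) =====
-- def hash_int64_func(prev_hash: int, current_value: int) -> int:
--     GOLDEN_RATIO = 0x9e3779b97f4a7c15
--     hash_unsigned = prev_hash & 0xFFFFFFFFFFFFFFFF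
--     value_unsigned = current_value & 0xFFFFFFFFFFFFFFFF
--     left_shift = (hash_unsigned << 12) & 0xFFFFFFFFFFFFFFFF
--     right_shift = hash_unsigned >> 32
--     rhs = (value_unsigned + GOLDEN_RATIO + left_shift + right_shift) & 0xFFFFFFFFFFFFFFFF
--     result = (hash_unsigned ^ rhs) & 0xFFFFFFFFFFFFFFFF
--     if result >= 0x8000000000000000:
--         result -= 0x10000000000000000
--     return result
--
-- def tokens_to_block_ids(token_ids, block_size=16, truncate=False):
--     # Single flat pass: one running hash, counter resets at each full block.
--     block_ids = []
--     h = 0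
--     count = 0
--     for token in token_ids:
--         h = hash_int64_func(h, token)
--         count += 1
--         if count == block_size:
--             block_ids.append(h)
--             count = 0
--     if count and not truncate:
--         block_ids.append(h)
--     return block_ids
-- ===== Notes on version B (the rewrite author's own statement) =====
-- stated objective: simpler
-- what changed: Replaces A's outer range(0,n,block_size) loop that slices out each block and re-folds it with a single flat fold over token_ids carrying a running hash and a block counter, appending the running hash at each full block and once more for a trailing partial block unless truncate.
-- outside the precondition, e.g. on tokens_to_block_ids([1, 2], -3, False): A returns [], B returns [-8366447756632839738]
import Mathlib
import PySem

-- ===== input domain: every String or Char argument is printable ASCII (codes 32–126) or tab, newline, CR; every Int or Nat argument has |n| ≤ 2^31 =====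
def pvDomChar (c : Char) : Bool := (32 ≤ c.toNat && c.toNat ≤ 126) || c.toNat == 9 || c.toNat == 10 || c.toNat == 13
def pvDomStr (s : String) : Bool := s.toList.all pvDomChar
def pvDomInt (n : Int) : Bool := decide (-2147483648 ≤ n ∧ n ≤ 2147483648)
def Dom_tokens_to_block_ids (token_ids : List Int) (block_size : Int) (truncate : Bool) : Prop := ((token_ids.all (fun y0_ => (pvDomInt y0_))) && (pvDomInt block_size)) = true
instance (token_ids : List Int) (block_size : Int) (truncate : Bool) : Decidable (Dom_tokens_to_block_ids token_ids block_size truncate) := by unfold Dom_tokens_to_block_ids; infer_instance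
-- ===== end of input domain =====

-- B replaces A's nested per-block slicing loop by a single flat fold over the tokens with a
-- running hash and a block counter (objective: simpler, one pass, no slicing).

-- ===== PORT A =====
-- Shared helper (B keeps it unchanged): Python's &, ^, <<, >> on ints are exactly
-- PySem.Int.band/bxor and Lean's <<< / >>> per PYSEM.md.
def hash_int64_func (prev_hash : Int) (current_value : Int) : Int :=
  let value_hash := current_value
  let golden : Int := 0x9e3779b97f4a7c15
  let hash_unsigned := PySem.Int.band prev_hash 0xFFFFFFFFFFFFFFFF
  let value_unsigned := PySem.Int.band value_hash 0xFFFFFFFFFFFFFFFF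
  let left_shift := PySem.Int.band (hash_unsigned <<< 12) 0xFFFFFFFFFFFFFFFF
  let right_shift := hash_unsigned >>> 32
  let rhs := PySem.Int.band (value_unsigned + golden + left_shift + right_shift) 0xFFFFFFFFFFFFFFFF
  let result := PySem.Int.band (PySem.Int.bxor hash_unsigned rhs) 0xFFFFFFFFFFFFFFFF
  if result ≥ 0x8000000000000000 then result - 0x10000000000000000 else result

def tokens_to_block_ids (token_ids : List Int) (block_size : Int) (truncate : Bool) : List Int :=
  let st := (PySem.List.pyRange 0 (token_ids.length : Int) block_size).foldl
    (fun (st : List Int × Int) i =>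
      if truncate && decide (i + block_size > (token_ids.length : Int)) then st
      else
        let block_tokens := PySem.List.slice token_ids (some i) (some (i + block_size))
        let block_hash := block_tokens.foldl (fun h token => hash_int64_func h token) st.2
        (st.1 ++ [block_hash], block_hash))
    ([], 0)
  st.1

-- ===== PORT B =====
def tokens_to_block_ids_alt (token_ids : List Int) (block_size : Int) (truncate : Bool) : List Int :=
  let st := token_ids.foldl
    (fun (st : List Int × Int × Int) token =>
      let h := hash_int64_func st.2.1 token
      let c := st.2.2 + 1
      if c == block_size then (st.1 ++ [h], h, 0) else (st.1, h, c))
    ([], 0, 0)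
  if st.2.2 != 0 && !truncate then st.1 ++ [st.2.1] else st.1

-- ===== PRECONDITION & SPEC =====
-- Pre_ excludes non-positive block_size: at block_size = 0 the Python A raises ValueError
-- (range() step 0), and for negative block_size A's empty result is an artefact of
-- range(0, n, negative) being empty; B there hashes the whole list as one block.
def Pre_tokens_to_block_ids (token_ids : List Int) (block_size : Int) (truncate : Bool) : Prop :=
  0 < block_size
instance (token_ids : List Int) (block_size : Int) (truncate : Bool) : Decidable (Pre_tokens_to_block_ids token_ids block_size truncate) := by unfold Pre_tokens_to_block_ids; infer_instance
def pvWitness_tokens_to_block_ids : List Int × Int × Bool := ([1, 2, 3], 2, false)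

def Spec_tokens_to_block_ids (token_ids : List Int) (block_size : Int) (truncate : Bool) (out : List Int) : Prop := out = tokens_to_block_ids_alt token_ids block_size truncate
instance (token_ids : List Int) (block_size : Int) (truncate : Bool) (out : List Int) : Decidable (Spec_tokens_to_block_ids token_ids block_size truncate out) := by unfold Spec_tokens_to_block_ids; infer_instance

-- ===== CLAIM (what is proved, stated in full; the proofs are below) =====
def Claim_equal_tokens_to_block_ids : Prop := ∀ (token_ids : List Int) (block_size : Int) (truncate : Bool), Dom_tokens_to_block_ids token_ids block_size truncate → Pre_tokens_to_block_ids token_ids block_size truncate → Spec_tokens_to_block_ids token_ids block_size truncate (tokens_to_block_ids token_ids block_size truncate)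

-- ===== LEMMAS AND PROOFS =====

-- Reference chunked recursion both ports are reduced to (proof-only helper).
def pvChunks (bs : Nat) (tr : Bool) (h : Int) : List Int → List Int
  | [] => []
  | t :: ts =>
      let block := (t :: ts).take bs
      let h' := block.foldl (fun h token => hash_int64_func h token) h
      if (t :: ts).length < bs then (if tr then [] else [h'])
      else h' :: pvChunks bs tr h' (ts.drop (bs - 1))
  termination_by ts => ts.length + 1
  decreasing_by simp

-- range(0, n, s) peeled at the front, for 0 < s, 0 < n
lemma pvRange_pos_peel (n s : Int) (hs : 0 < s) (hn : 0 < n) :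
    PySem.List.pyRange 0 n s = 0 :: (PySem.List.pyRange 0 (n - s) s).map (s + ·) := by
  rw [PySem.List.pyRange_of_pos _ _ hs, PySem.List.pyRange_of_pos _ _ hs]
  by_cases hns : 0 < n - s
  · have h1 : (if (0:Int) < n then ((n - 0 + s - 1) / s).toNat else 0)
        = ((n - s - 0 + s - 1) / s).toNat + 1 := by
      simp only [if_pos hn]
      have e : n - 0 + s - 1 = (n - s - 0 + s - 1) + 1 * s := by ring
      rw [e, Int.add_mul_ediv_right _ _ (by omega)]
      have := Int.ediv_nonneg (a := n - s - 0 + s - 1) (b := s) (by omega) (by omega)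
      omega
    rw [h1, if_pos hns, List.range_succ_eq_map, List.map_cons, List.map_map, List.map_map]
    congr 1
    · simp
    apply List.map_congr_left
    intro k _
    simp [Function.comp]
    ring
  · have h1 : (if (0:Int) < n then ((n - 0 + s - 1) / s).toNat else 0) = 1 := by
      simp only [if_pos hn]
      have hdiv : (n - 0 + s - 1) / s = 1 := by
        have e : n - 0 + s - 1 = (n - 1) + 1 * s := by ring
        rw [e, Int.add_mul_ediv_right _ _ (by omega),
            Int.ediv_eq_zero_of_lt (by omega) (by omega)]
        ring
      rw [hdiv]; rfl
    rw [h1, if_neg hns]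
    simp

-- A's range-and-slice loop computes pvChunks, for any starting accumulator and hash.
lemma pvAloop (bs : Int) (hbs : 0 < bs) (tr : Bool) :
    ∀ (N : Nat) (toks : List Int), toks.length ≤ N → ∀ (acc : List Int) (h : Int),
    ((PySem.List.pyRange 0 (toks.length : Int) bs).foldl
      (fun (st : List Int × Int) i =>
        if tr && decide (i + bs > (toks.length : Int)) then st
        else
          let block_tokens := PySem.List.slice toks (some i) (some (i + bs))
          let block_hash := block_tokens.foldl (fun h token => hash_int64_func h token) st.2
          (st.1 ++ [block_hash], block_hash))
      (acc, h)).1 = acc ++ pvChunks bs.toNat tr h toks := by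
  intro N
  induction N with
  | zero =>
      intro toks hlen acc h
      have : toks = [] := List.length_eq_zero_iff.mp (by omega)
      subst this
      rw [PySem.List.pyRange_of_pos _ _ hbs]
      simp [pvChunks]
  | succ N ih =>
      intro toks hlen acc h
      cases toks with
      | nil =>
          rw [PySem.List.pyRange_of_pos _ _ hbs]
          simp [pvChunks]
      | cons t ts =>
        have hn : (0:Int) < ((t :: ts).length : Int) := by
          simp only [List.length_cons]; push_cast; omega
        rw [pvRange_pos_peel _ bs hbs hn, List.foldl_cons]
        have hslice : PySem.List.slice (t :: ts) (some 0) (some (0 + bs))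
            = (t :: ts).take bs.toNat := by
          rw [zero_add, PySem.List.slice_toNat _ (le_refl 0) (le_of_lt hbs)]
          simp
        by_cases hsmall : ((t :: ts).length : Int) < bs
        · have hrest : PySem.List.pyRange 0 (((t :: ts).length : Int) - bs) bs = [] := by
            rw [PySem.List.pyRange_of_pos _ _ hbs, if_neg (by omega)]
            simp
          rw [hrest]
          simp only [List.map_nil, List.foldl_nil]
          have hlt : (t :: ts).length < bs.toNat := by omega
          cases tr with
          | true =>
              have hcond : (true && decide ((0:Int) + bs > ((t :: ts).length : Int))) = true := by
                simp only [Bool.true_and, decide_eq_true_iff]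
                omega
              rw [if_pos hcond]
              simp [pvChunks]
              simp only [List.length_cons] at hsmall
              push_cast at hsmall
              omega
          | false =>
              simp only [Bool.false_and, Bool.false_eq_true, if_false, hslice]
              have htake : (t :: ts).take bs.toNat = t :: ts :=
                List.take_of_length_le (by omega)
              simp [pvChunks, htake]
              intro hc
              exfalso
              simp only [List.length_cons] at hsmall
              push_cast at hsmall
              omega
        · rw [not_lt] at hsmall
          have hd : decide ((0:Int) + bs > ((t :: ts).length : Int)) = false :=
            decide_eq_false (by omega)
          rw [hd, Bool.and_false]
          simp only [Bool.false_eq_true, if_false, hslice]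
          rw [List.foldl_map]
          have hlen' : (((( t :: ts).drop bs.toNat).length : Int)) = ((t :: ts).length : Int) - bs := by
            rw [List.length_drop]; omega
          have hcongr := PySem.List.foldl_congr_mem
            (l := PySem.List.pyRange 0 (((t :: ts).length : Int) - bs) bs)
            (init := ((acc ++ [((t :: ts).take bs.toNat).foldl (fun h token => hash_int64_func h token) h],
                       ((t :: ts).take bs.toNat).foldl (fun h token => hash_int64_func h token) h) : List Int × Int))
            (f := fun (st : List Int × Int) k =>
              if tr && decide (bs + k + bs > ((t :: ts).length : Int)) then st
              else
                let block_tokens := PySem.List.slice (t :: ts) (some (bs + k)) (some (bs + k + bs))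
                let block_hash := block_tokens.foldl (fun h token => hash_int64_func h token) st.2
                (st.1 ++ [block_hash], block_hash))
            (g := fun (st : List Int × Int) i =>
              if tr && decide (i + bs > ((((t :: ts).drop bs.toNat).length : Int))) then st
              else
                let block_tokens := PySem.List.slice ((t :: ts).drop bs.toNat) (some i) (some (i + bs))
                let block_hash := block_tokens.foldl (fun h token => hash_int64_func h token) st.2
                (st.1 ++ [block_hash], block_hash))
            (by
              intro st i hi
              have h0 : 0 ≤ i := by
                rw [PySem.List.pyRange_of_pos _ _ hbs] at hi
                simp only [List.mem_map, List.mem_range] at hi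
                obtain ⟨k, _, rfl⟩ := hi
                positivity
              have hcondeq : (tr && decide (bs + i + bs > ((t :: ts).length : Int)))
                  = (tr && decide (i + bs > ((((t :: ts).drop bs.toNat).length : Int)))) := by
                rw [hlen']
                congr 1
                exact decide_eq_decide.mpr (by omega)
              have hsl : PySem.List.slice (t :: ts) (some (bs + i)) (some (bs + i + bs))
                  = PySem.List.slice ((t :: ts).drop bs.toNat) (some i) (some (i + bs)) := by
                rw [PySem.List.slice_toNat _ (by omega) (by omega),
                    PySem.List.slice_toNat _ h0 (by omega)]
                rw [List.drop_drop]
                have e1 : (bs + i + bs).toNat - (bs + i).toNat = (i + bs).toNat - i.toNat := by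
                  omega
                have e2 : (bs + i).toNat = bs.toNat + i.toNat := by omega
                rw [e1, e2]
              simp only [hcondeq, hsl])
          rw [hcongr, ← hlen',
              ih ((t :: ts).drop bs.toNat) (by rw [List.length_drop]; omega) _ _]
          have hdrop : ts.drop (bs.toNat - 1) = (t :: ts).drop bs.toNat := by
            rcases Nat.exists_eq_succ_of_ne_zero (n := bs.toNat) (by omega) with ⟨k, hk⟩
            rw [hk]
            simp [List.drop_succ_cons]
          have hnlt : ¬ (t :: ts).length < bs.toNat := by omega
          conv_rhs => rw [pvChunks]
          simp only [hnlt, if_false, hdrop, List.append_assoc, List.singleton_append]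

-- B's counter never reaching bs: a straight fold of the hash, counter advanced by the length.
lemma pvBsteps (bs : Int) :
    ∀ (ys : List Int) (acc : List Int) (h c : Int), c + (ys.length : Int) < bs →
    ys.foldl
      (fun (st : List Int × Int × Int) token =>
        let h := hash_int64_func st.2.1 token
        let c := st.2.2 + 1
        if c == bs then (st.1 ++ [h], h, 0) else (st.1, h, c))
      (acc, h, c)
    = (acc, ys.foldl (fun h token => hash_int64_func h token) h, c + (ys.length : Int)) := by
  intro ys
  induction ys with
  | nil => intro acc h c _; norm_num
  | cons y ys ih =>
      intro acc h c hlt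
      simp only [List.foldl_cons]
      have hne : (c + 1 == bs) = false := by
        rw [beq_eq_false_iff_ne]
        simp only [List.length_cons] at hlt
        push_cast at hlt
        omega
      simp only [hne, Bool.false_eq_true, if_false]
      rw [ih _ _ _ (by simp only [List.length_cons] at hlt; push_cast at hlt ⊢; omega)]
      have e : c + 1 + (ys.length : Int) = c + ((y :: ys).length : Int) := by
        simp only [List.length_cons]; push_cast; ring
      rw [e]

-- One full block through B's fold: append the running hash, reset the counter.
lemma pvBchunk (bs : Int) (hbs : 0 < bs) :
    ∀ (ys : List Int), ys.length = bs.toNat → ∀ (acc : List Int) (h : Int),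
    ys.foldl
      (fun (st : List Int × Int × Int) token =>
        let h := hash_int64_func st.2.1 token
        let c := st.2.2 + 1
        if c == bs then (st.1 ++ [h], h, 0) else (st.1, h, c))
      (acc, h, 0)
    = (acc ++ [ys.foldl (fun h token => hash_int64_func h token) h],
       ys.foldl (fun h token => hash_int64_func h token) h, 0) := by
  intro ys hlen acc h
  rcases List.eq_nil_or_concat ys with rfl | ⟨zs, z, rfl⟩
  · simp at hlen; omega
  · simp only [List.concat_eq_append] at hlen ⊢
    have hzs : (zs.length : Int) = bs - 1 := by
      simp only [List.length_append, List.length_singleton] at hlen; omega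
    rw [List.foldl_append, List.foldl_append]
    rw [pvBsteps bs zs acc h 0 (by omega)]
    simp only [List.foldl_cons, List.foldl_nil]
    have hbeq : (0 + (zs.length : Int) + 1 == bs) = true := by rw [beq_iff_eq]; omega
    simp only [hbeq, if_true]

-- B's fold plus the trailing-block rule computes pvChunks.
lemma pvBloop (bs : Int) (hbs : 0 < bs) (tr : Bool) :
    ∀ (N : Nat) (toks : List Int), toks.length ≤ N → ∀ (acc : List Int) (h : Int),
    (let st := toks.foldl
      (fun (st : List Int × Int × Int) token =>
        let h := hash_int64_func st.2.1 token
        let c := st.2.2 + 1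
        if c == bs then (st.1 ++ [h], h, 0) else (st.1, h, c))
      (acc, h, 0)
     if st.2.2 != 0 && !tr then st.1 ++ [st.2.1] else st.1)
    = acc ++ pvChunks bs.toNat tr h toks := by
  intro N
  induction N with
  | zero =>
      intro toks hlen acc h
      have : toks = [] := List.length_eq_zero_iff.mp (by omega)
      subst this
      simp [pvChunks]
  | succ N ih =>
      intro toks hlen acc h
      cases toks with
      | nil => simp [pvChunks]
      | cons t ts =>
        by_cases hsmall : ((t :: ts).length : Int) < bs
        · rw [pvBsteps bs (t :: ts) acc h 0 (by omega)]
          have hne : ((0 + ((t :: ts).length : Int)) != 0) = true := by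
            rw [bne_iff_ne]
            simp only [List.length_cons]
            push_cast
            omega
          have hlt : (t :: ts).length < bs.toNat := by
            simp only [List.length_cons] at hsmall ⊢
            omega
          cases tr with
          | false =>
              simp only [hne, Bool.not_false, Bool.and_true, if_true]
              have htake : (t :: ts).take bs.toNat = t :: ts :=
                List.take_of_length_le (by omega)
              simp [pvChunks, htake]
              intro hc
              exfalso
              simp only [List.length_cons] at hsmall
              push_cast at hsmall
              omega
          | true =>
              simp only [hne, Bool.not_true, Bool.and_false, Bool.false_eq_true, if_false]
              simp [pvChunks]
              simp only [List.length_cons] at hsmall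
              push_cast at hsmall
              omega
        · rw [not_lt] at hsmall
          have hbsle : bs.toNat ≤ (t :: ts).length := by
            simp only [List.length_cons] at hsmall ⊢
            omega
          have htklen : ((t :: ts).take bs.toNat).length = bs.toNat := by
            rw [List.length_take]; omega
          have hfold : (t :: ts).foldl
              (fun (st : List Int × Int × Int) token =>
                let h := hash_int64_func st.2.1 token
                let c := st.2.2 + 1
                if c == bs then (st.1 ++ [h], h, 0) else (st.1, h, c))
              (acc, h, 0)
            = ((t :: ts).drop bs.toNat).foldl
              (fun (st : List Int × Int × Int) token =>
                let h := hash_int64_func st.2.1 token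
                let c := st.2.2 + 1
                if c == bs then (st.1 ++ [h], h, 0) else (st.1, h, c))
              (acc ++ [((t :: ts).take bs.toNat).foldl (fun h token => hash_int64_func h token) h],
               ((t :: ts).take bs.toNat).foldl (fun h token => hash_int64_func h token) h, 0) := by
            conv_lhs => rw [← List.take_append_drop bs.toNat (t :: ts)]
            rw [List.foldl_append, pvBchunk bs hbs _ htklen]
          rw [hfold]
          rw [ih ((t :: ts).drop bs.toNat) (by rw [List.length_drop]; omega) _ _]
          have hdrop : ts.drop (bs.toNat - 1) = (t :: ts).drop bs.toNat := by
            rcases Nat.exists_eq_succ_of_ne_zero (n := bs.toNat) (by omega) with ⟨k, hk⟩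
            rw [hk]
            simp [List.drop_succ_cons]
          have hnlt : ¬ (t :: ts).length < bs.toNat := by omega
          conv_rhs => rw [pvChunks]
          simp only [hnlt, if_false, hdrop, List.append_assoc, List.singleton_append]

-- ===== VERDICT (by name: the statement is the Claim_ definition above) =====
theorem tokens_to_block_ids_spec : Claim_equal_tokens_to_block_ids := by
  intro token_ids block_size truncate _ hpre
  unfold Spec_tokens_to_block_ids tokens_to_block_ids tokens_to_block_ids_alt
  rw [pvAloop block_size hpre truncate token_ids.length token_ids le_rfl [] 0]
  rw [pvBloop block_size hpre truncate token_ids.length token_ids le_rfl [] 0]
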